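-- pv_equiv track=rewrite | github.com/isleym9447/CTS285 | Streamlit/introspectiveimmersion/personality_quiz.py | calculate_trope
-- ===== SOURCE A (Python) =====
-- def calculate_trope(results: dict[str, int]) -> tuple[str, int]:
--     """Calculates the user's primary trope from the quiz results."""
--     if not results or all(v == 0 for v in results.values()):
--         return ("Undetermined", 0)
--
--     primary_trope = max(results, key=results.get)
--     max_score = results[primary_trope]
--
--     tied_tropes = [k for k, v in results.items() if v == max_score]
--     if len(tied_tropes) > 1:
--         return (f"Tied ({' & '.join(tied_tropes)})", max_score)
--
--     return (primary_trope, max_score)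
-- ===== SOURCE B (Python) =====
-- def calculate_trope(results: dict[str, int]) -> tuple[str, int]:
--     """Calculates the user's primary trope from the quiz results."""
--     items = list(results.items())
--     if not items or all(v == 0 for _, v in items):
--         return ("Undetermined", 0)
--     (first_key, best), *rest = items
--     tied = [first_key]
--     for k, v in rest:
--         if v > best:
--             best, tied = v, [k]
--         elif v == best:
--             tied.append(k)
--     if len(tied) > 1:
--         return ("Tied ({})".format(" & ".join(tied)), best)
--     return (tied[0], best)
-- ===== Notes on version B (the rewrite author's own statement) =====
-- stated objective: alternative
-- what changed: A finds the max key via max(key=results.get) with dict lookups and then a second filtering scan for ties; B makes one accumulating pass over items(), maintaining the best score (seeded from the first item) and the in-order list of keys tied at it, with no lookups and no second scan.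
import Mathlib
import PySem

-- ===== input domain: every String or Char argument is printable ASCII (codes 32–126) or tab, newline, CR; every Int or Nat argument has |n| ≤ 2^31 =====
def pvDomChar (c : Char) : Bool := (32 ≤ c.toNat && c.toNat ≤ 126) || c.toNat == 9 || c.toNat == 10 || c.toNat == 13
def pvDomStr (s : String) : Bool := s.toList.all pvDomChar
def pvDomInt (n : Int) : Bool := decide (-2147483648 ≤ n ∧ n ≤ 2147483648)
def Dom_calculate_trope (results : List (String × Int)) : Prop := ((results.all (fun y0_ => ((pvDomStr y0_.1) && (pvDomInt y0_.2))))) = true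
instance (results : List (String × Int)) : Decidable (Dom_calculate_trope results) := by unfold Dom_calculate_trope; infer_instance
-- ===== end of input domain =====

-- B fuses A's max-scan and tie-filter scan into one accumulating pass (alternative decomposition, same cost).


-- ===== PORT A =====
-- results.get(k) — on A's path every key looked up is present, so the default is never used
def aGet (results : List (String × Int)) (k : String) : Int :=
  (PySem.Dict.mk results).getD k 0

-- max(results, key=results.get): fold over the remaining keys, keeping the FIRST maximal key
def aMaxKey (results : List (String × Int)) (best : String) (ks : List String) : String :=
  ks.foldl (fun b k => if aGet results k > aGet results b then k else b) best

def calculate_trope (results : List (String × Int)) : String × Int :=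
  if results = [] ∨ results.all (fun p => p.2 == 0) then ("Undetermined", 0)
  else
    match results with
    | [] => ("Undetermined", 0)  -- unreachable: guard above handles []
    | (k0, _) :: rest =>
      let primary := aMaxKey results k0 (rest.map Prod.fst)
      let maxScore := aGet results primary
      let tied := (results.filter (fun p => p.2 == maxScore)).map Prod.fst
      if tied.length > 1 then ("Tied (" ++ PySem.Str.join " & " tied ++ ")", maxScore)
      else (primary, maxScore)

-- ===== PORT B =====
-- one step of B's loop: state = (best score so far, keys tied at it, in order)
def bStep (st : Int × List String) (p : String × Int) : Int × List String :=
  if p.2 > st.1 then (p.2, [p.1])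
  else if p.2 == st.1 then (st.1, st.2 ++ [p.1])
  else st

def calculate_trope_alt (results : List (String × Int)) : String × Int :=
  if results = [] ∨ results.all (fun p => p.2 == 0) then ("Undetermined", 0)
  else
    match results with
    | [] => ("Undetermined", 0)  -- unreachable: guard above handles []
    | (k0, v0) :: rest =>
      let st := rest.foldl bStep (v0, [k0])
      if st.2.length > 1 then ("Tied (" ++ PySem.Str.join " & " st.2 ++ ")", st.1)
      else (st.2.headD "", st.1)

-- ===== PRECONDITION & SPEC =====
-- Pre_ excludes association lists with duplicate keys: the Python parameter is a dict, which cannot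
-- hold two entries with the same key, so such lists represent no input of A.
def Pre_calculate_trope (results : List (String × Int)) : Prop :=
  (results.map Prod.fst).Nodup
instance (results : List (String × Int)) : Decidable (Pre_calculate_trope results) := by
  unfold Pre_calculate_trope; infer_instance
def pvWitness_calculate_trope : (List (String × Int)) := [("Hero", 3), ("Rogue", 3), ("Sage", -1)]

def Spec_calculate_trope (results : List (String × Int)) (out : String × Int) : Prop := out = calculate_trope_alt results
instance (results : List (String × Int)) (out : String × Int) : Decidable (Spec_calculate_trope results out) := by unfold Spec_calculate_trope; infer_instance

-- ===== CLAIM (what is proved, stated in full; the proofs are below) =====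
def Claim_equal_calculate_trope : Prop := ∀ (results : List (String × Int)), Dom_calculate_trope results → Pre_calculate_trope results → Spec_calculate_trope results (calculate_trope results)

-- ===== LEMMAS AND PROOFS =====

-- running maximum of the values of l, seeded with b (the way both folds advance their best score)
def vmax (b : Int) (l : List (String × Int)) : Int :=
  l.foldl (fun a p => max a p.2) b

theorem vmax_nil (b : Int) : vmax b [] = b := rfl

theorem vmax_cons (b : Int) (p : String × Int) (l : List (String × Int)) :
    vmax b (p :: l) = vmax (max b p.2) l := rfl

theorem le_vmax (b : Int) (l : List (String × Int)) : b ≤ vmax b l := by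
  induction l generalizing b with
  | nil => exact le_refl b
  | cons p l ih =>
    rw [vmax_cons]
    exact le_trans (le_max_left b p.2) (ih (max b p.2))

-- B's fold characterisation: final best = vmax, tied = keys achieving it, in order
theorem bFold_spec (l : List (String × Int)) (b : Int) (t : List String) :
    l.foldl bStep (b, t) =
      (vmax b l,
       (if b = vmax b l then t else []) ++ (l.filter (fun p => p.2 == vmax b l)).map Prod.fst) := by
  induction l generalizing b t with
  | nil => simp [vmax_nil]
  | cons p l ih =>
    rw [List.foldl_cons, vmax_cons]
    rcases lt_trichotomy b p.2 with h | h | h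
    · rw [show bStep (b, t) p = (p.2, [p.1]) from by simp [bStep, h], ih,
        show max b p.2 = p.2 from max_eq_right h.le]
      have hv := le_vmax p.2 l
      have hne : b ≠ vmax p.2 l := by omega
      rw [if_neg hne]
      by_cases hp : p.2 = vmax p.2 l
      · simp only [List.filter_cons, show (p.2 == vmax p.2 l) = true from beq_iff_eq.mpr hp,
          if_true, if_pos hp, List.map_cons]
        simp
      · simp only [List.filter_cons, show (p.2 == vmax p.2 l) = false from beq_eq_false_iff_ne.mpr hp,
          Bool.false_eq_true, if_false, if_neg hp]
    · rw [show bStep (b, t) p = (b, t ++ [p.1]) from by simp [bStep, h], ih,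
        show max b p.2 = b from by omega]
      by_cases hbm : b = vmax b l
      · have hcond : (p.2 == vmax b l) = true := by rw [← h]; exact beq_iff_eq.mpr hbm
        simp only [List.filter_cons, hcond, if_true, if_pos hbm, List.map_cons]
        simp
      · have hcond : (p.2 == vmax b l) = false := by
          rw [← h]; exact beq_eq_false_iff_ne.mpr hbm
        simp [List.filter_cons, hcond, if_neg hbm]
    · rw [show bStep (b, t) p = (b, t) from by
        simp [bStep, show ¬ b < p.2 from by omega, show (p.2 == b) = false from by simp; omega], ih,
        show max b p.2 = b from by omega]
      have hne : (p.2 == vmax b l) = false := by have := le_vmax b l; simp; omega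
      simp [List.filter_cons, hne]

-- dict lookup of the head key
theorem aGet_head (k : String) (v : Int) (l : List (String × Int)) :
    aGet ((k, v) :: l) k = v := by
  simp [aGet, PySem.Dict.getD, PySem.Dict.get?_mk_cons]

-- dict lookup of a member pair, under nodup keys
theorem aGet_mem (l : List (String × Int)) (hnd : (l.map Prod.fst).Nodup)
    (k : String) (v : Int) (hm : (k, v) ∈ l) : aGet l k = v := by
  induction l with
  | nil => cases hm
  | cons q l ih =>
    obtain ⟨qk, qv⟩ := q
    rcases List.mem_cons.mp hm with h | h
    · cases h; exact aGet_head k v l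
    · have hk : k ≠ qk := by
        intro he
        have : qk ∈ l.map Prod.fst := List.mem_map.mpr ⟨(k, v), h, by simp [he]⟩
        exact (List.nodup_cons.mp (by simpa using hnd)).1 this
      have : aGet ((qk, qv) :: l) k = aGet l k := by
        simp [aGet, PySem.Dict.getD, PySem.Dict.get?_mk_cons, show (qk == k) = false by
          simp [Ne.symm hk]]
      rw [this]
      exact ih (List.nodup_cons.mp (by simpa using hnd)).2 h

-- found lookup value means the pair is a member
theorem mem_of_aGet (l : List (String × Int)) (k : String) (hk : k ∈ l.map Prod.fst) :
    (k, aGet l k) ∈ l := by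
  induction l with
  | nil => simp at hk
  | cons q l ih =>
    obtain ⟨qk, qv⟩ := q
    by_cases h : qk = k
    · cases h
      rw [aGet_head]
      exact List.mem_cons_self ..
    · have he : aGet ((qk, qv) :: l) k = aGet l k := by
        simp [aGet, PySem.Dict.getD, PySem.Dict.get?_mk_cons, show (qk == k) = false by simp [h]]
      rw [he]
      refine List.mem_cons_of_mem _ (ih ?_)
      rcases List.mem_map.mp hk with ⟨p, hp, hpe⟩
      rcases List.mem_cons.mp hp with h' | h'
      · exact absurd (by rw [← hpe, h']) h
      · exact List.mem_map.mpr ⟨p, h', hpe⟩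

-- A's max fold computes a key whose value is vmax, under nodup keys
theorem aMaxKey_get (results : List (String × Int)) (hnd : (results.map Prod.fst).Nodup)
    (b : String) (ks : List String) (hb : b ∈ results.map Prod.fst)
    (hks : ∀ k ∈ ks, k ∈ results.map Prod.fst) :
    aGet results (aMaxKey results b ks) =
      ks.foldl (fun a k => max a (aGet results k)) (aGet results b) ∧
    aMaxKey results b ks ∈ results.map Prod.fst := by
  induction ks generalizing b with
  | nil => exact ⟨rfl, hb⟩
  | cons k ks ih =>
    unfold aMaxKey
    rw [List.foldl_cons, List.foldl_cons]
    by_cases h : aGet results k > aGet results b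
    · simp only [if_pos h]
      have := ih k (hks k (List.mem_cons_self ..)) (fun x hx => hks x (List.mem_cons_of_mem k hx))
      unfold aMaxKey at this
      rw [this.1, show max (aGet results b) (aGet results k) = aGet results k by omega]
      exact ⟨rfl, this.2⟩
    · simp only [if_neg h]
      have := ih b hb (fun x hx => hks x (List.mem_cons_of_mem k hx))
      unfold aMaxKey at this
      rw [this.1, show max (aGet results b) (aGet results k) = aGet results b by omega]
      exact ⟨rfl, this.2⟩

-- the key-fold over rest's keys computes vmax v0 rest, under nodup keys on the whole list
theorem keyfold_eq_vmax (k0 : String) (v0 : Int) (rest : List (String × Int))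
    (hnd : ((((k0, v0) :: rest).map Prod.fst)).Nodup) :
    (rest.map Prod.fst).foldl (fun a k => max a (aGet ((k0, v0) :: rest) k))
      (aGet ((k0, v0) :: rest) k0) = vmax v0 rest := by
  rw [aGet_head, List.foldl_map]
  unfold vmax
  apply PySem.List.foldl_congr_mem
  intro a p hp
  rw [aGet_mem ((k0, v0) :: rest) hnd p.1 p.2 (List.mem_cons_of_mem _ hp)]

-- ===== VERDICT (by name: the statement is the Claim_ definition above) =====
theorem calculate_trope_spec : Claim_equal_calculate_trope := by
  intro results _ hpre
  unfold Spec_calculate_trope calculate_trope calculate_trope_alt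
  by_cases hg : results = [] ∨ results.all (fun p => p.2 == 0)
  · rw [if_pos hg, if_pos hg]
  · rw [if_neg hg, if_neg hg]
    match results, hpre with
    | [], _ => rfl
    | (k0, v0) :: rest, hpre =>
      dsimp only
      have hnd : (((k0, v0) :: rest).map Prod.fst).Nodup := hpre
      have hmk := aMaxKey_get ((k0, v0) :: rest) hnd k0 (rest.map Prod.fst)
        (by simp) (fun k hk => by simp [hk])
      have hscore : aGet ((k0, v0) :: rest)
          (aMaxKey ((k0, v0) :: rest) k0 (rest.map Prod.fst)) = vmax v0 rest := by
        rw [hmk.1, keyfold_eq_vmax k0 v0 rest hnd]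
      rw [hscore, bFold_spec]
      have htied : (if v0 = vmax v0 rest then [k0] else []) ++
          (rest.filter (fun p => p.2 == vmax v0 rest)).map Prod.fst =
          (((k0, v0) :: rest).filter (fun p => p.2 == vmax v0 rest)).map Prod.fst := by
        by_cases h : v0 = vmax v0 rest
        · simp only [List.filter_cons, show ((k0, v0).2 == vmax v0 rest) = true from
            beq_iff_eq.mpr h, if_true, if_pos h, List.map_cons, List.singleton_append]
        · simp only [List.filter_cons, show ((k0, v0).2 == vmax v0 rest) = false from
            beq_eq_false_iff_ne.mpr h, Bool.false_eq_true, if_false, if_neg h, List.nil_append]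
      simp only [htied]
      by_cases hlen :
          1 < ((((k0, v0) :: rest).filter (fun p => p.2 == vmax v0 rest)).map Prod.fst).length
      · simp only [if_pos hlen]
      · simp only [if_neg hlen]
        have hpm : aMaxKey ((k0, v0) :: rest) k0 (rest.map Prod.fst) ∈
            (((k0, v0) :: rest).filter (fun p => p.2 == vmax v0 rest)).map Prod.fst := by
          have hm := mem_of_aGet ((k0, v0) :: rest) _ hmk.2
          rw [hscore] at hm
          exact List.mem_map.mpr ⟨(_, vmax v0 rest), List.mem_filter.mpr ⟨hm, by simp⟩, rfl⟩
        have hone : (((k0, v0) :: rest).filter (fun p => p.2 == vmax v0 rest)).map Prod.fst =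
            [aMaxKey ((k0, v0) :: rest) k0 (rest.map Prod.fst)] := by
          rcases hq : (((k0, v0) :: rest).filter (fun p => p.2 == vmax v0 rest)).map Prod.fst
            with _ | ⟨x, _ | ⟨y, t⟩⟩
          · rw [hq] at hpm; simp at hpm
          · rw [hq] at hpm; rw [hq, List.mem_singleton.mp hpm]
          · rw [hq] at hlen; simp at hlen
        rw [hone]
        rfl
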